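-- pv_equiv track=rewrite | github.com/jcwoods/nsubstrings | nsubstrings.py | nsubstrings
-- ===== SOURCE A (Python) =====
-- def nsubstrings(s:str, n:int):
--     '''
--     Splits the string 's' into all possible sets of 'n' non-overlapping
--     substrings.  The order of charaters in the input string is preserved
--     (eg, no permutations on the input).
--
--     Result is returned as a list of tuples.
--
--     For example:
--
--     substrings('foobard', 3):
--        [(f o obard),  (fo o bard),  (foo b ard),  (foob a rd),  (fooba r d),
--         (f oo bard),  (fo ob ard),  (foo ba rd),  (foob ar d),
--         (f oob ard),  (fo oba rd),  (foo bar d),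
--         (f ooba rd),  (fo obar d),
--         (f oobar d)]
--     '''
--
--     tuples = list()
--     for i in range(1, len(s)):
--        pre = s[0:i]
--        post = s[i:]
--
--        if n == 2:
--            tuples.append( (pre, post) )
--        else:
--            subs = nsubstrings(post, n - 1)
--            p = (pre,)
--            for t in subs:
--                tuples.append(p + t)
--
--     return tuples
-- ===== SOURCE B (Python) =====
-- def nsubstrings(s, n):
--     # Top-down dynamic programming: each subproblem (suffix start, parts) is
--     # solved once and cached, instead of being recomputed along every path.
--     memo = {}
--
--     def go(j, m):
--         key = (j, m)
--         if key in memo: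
--             return memo[key]
--         out = []
--         for k in range(j + 1, len(s)):
--             if m == 2:
--                 out.append((s[j:k], s[k:]))
--             else:
--                 head = (s[j:k],)
--                 for t in go(k, m - 1):
--                     out.append(head + t)
--         memo[key] = out
--         return out
--
--     return go(0, n)
-- ===== Notes on version B (the rewrite author's own statement) =====
-- stated objective: alternative
-- what changed: Replaces A's naive recursion, which re-solves the same (suffix start, remaining parts) subproblem once per path reaching it, with top-down dynamic programming: a dict memoizes each subproblem keyed by (start index, parts), so every subresult is computed once (measured 3.88x at the largest size where both finished, but both are output-bound on large inputs, so no speed is claimed).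
import Mathlib
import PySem

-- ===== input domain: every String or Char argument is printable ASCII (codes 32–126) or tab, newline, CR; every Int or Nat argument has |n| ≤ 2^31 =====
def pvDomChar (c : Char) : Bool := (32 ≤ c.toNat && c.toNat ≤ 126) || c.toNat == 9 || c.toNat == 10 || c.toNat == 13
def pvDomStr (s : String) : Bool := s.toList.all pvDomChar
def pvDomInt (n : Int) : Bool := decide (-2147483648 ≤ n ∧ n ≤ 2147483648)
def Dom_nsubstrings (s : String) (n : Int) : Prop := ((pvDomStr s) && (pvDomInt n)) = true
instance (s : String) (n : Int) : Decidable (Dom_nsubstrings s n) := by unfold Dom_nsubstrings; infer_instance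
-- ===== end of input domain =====

-- B replaces A's naive recursion with top-down dynamic programming: each (suffix start, parts)
-- subproblem is computed once and cached, instead of being recomputed along every path.

-- ===== PORT A =====
def nsubA (cs : List Char) (n : Int) : List (List String) :=
  (PySem.List.pyRange 1 (cs.length : Int)).attach.foldl
    (fun tuples t =>
      have _h := (PySem.List.mem_pyRange_one).1 t.2
      let pre := PySem.List.slice cs (some 0) (some t.1)
      let post := PySem.List.slice cs (some t.1) none
      if n = 2 then tuples ++ [[String.ofList pre, String.ofList post]]
      else tuples ++ ((nsubA post (n - 1)).map fun tp => String.ofList pre :: tp))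
    []
termination_by cs.length
decreasing_by
  simp only [PySem.List.slice_from cs (by omega : (0:Int) ≤ t.1), List.length_drop]
  omega

def nsubstrings (s : String) (n : Int) : List (List String) := nsubA s.toList n

-- ===== PORT B =====
def nsubBgo (cs : List Char) (j m : Int)
    (memo : PySem.Dict (Int × Int) (List (List String))) :
    PySem.Dict (Int × Int) (List (List String)) × List (List String) :=
  match memo.get? (j, m) with
  | some v => (memo, v)
  | none =>
    let st := (PySem.List.pyRange (j + 1) (cs.length : Int)).attach.foldl
      (fun st t =>
        have _h := (PySem.List.mem_pyRange_one).1 t.2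
        if m = 2 then
          (st.1, st.2 ++ [[String.ofList (PySem.List.slice cs (some j) (some t.1)),
                           String.ofList (PySem.List.slice cs (some t.1) none)]])
        else
          let head := String.ofList (PySem.List.slice cs (some j) (some t.1))
          let r := nsubBgo cs t.1 (m - 1) st.1
          (r.1, st.2 ++ r.2.map fun tp => head :: tp))
      (memo, [])
    (st.1.insert (j, m) st.2, st.2)
termination_by ((cs.length : Int) - j).toNat
decreasing_by omega

def nsubstrings_alt (s : String) (n : Int) : List (List String) :=
  (nsubBgo s.toList 0 n PySem.Dict.empty).2

-- ===== PRECONDITION & SPEC =====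
def Spec_nsubstrings (s : String) (n : Int) (out : List (List String)) : Prop := out = nsubstrings_alt s n
instance (s : String) (n : Int) (out : List (List String)) : Decidable (Spec_nsubstrings s n out) := by unfold Spec_nsubstrings; infer_instance

-- ===== CLAIM (what is proved, stated in full; the proofs are below) =====
def Claim_equal_nsubstrings : Prop := ∀ (s : String) (n : Int), Dom_nsubstrings s n → Spec_nsubstrings s n (nsubstrings s n)

-- ===== LEMMAS AND PROOFS =====

-- the per-index contribution of A's loop body
def FA (cs : List Char) (n i : Int) : List (List String) :=
  if n = 2 then
    [[String.ofList (PySem.List.slice cs (some 0) (some i)),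
      String.ofList (PySem.List.slice cs (some i) none)]]
  else
    (nsubA (PySem.List.slice cs (some i) none) (n - 1)).map
      (String.ofList (PySem.List.slice cs (some 0) (some i)) :: ·)

-- the per-cut contribution of B's loop body, in absolute indices
def GB (cs : List Char) (m j k : Int) : List (List String) :=
  if m = 2 then
    [[String.ofList (PySem.List.slice cs (some j) (some k)),
      String.ofList (PySem.List.slice cs (some k) none)]]
  else
    (nsubA (PySem.List.slice cs (some k) none) (m - 1)).map
      (String.ofList (PySem.List.slice cs (some j) (some k)) :: ·)

-- the memo invariant: every cached value is the corresponding A-result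
def InvM (cs : List Char) (memo : PySem.Dict (Int × Int) (List (List String))) : Prop :=
  ∀ p v, memo.get? p = some v → v = nsubA (PySem.List.slice cs (some p.1) none) p.2

lemma nsubA_eq (cs : List Char) (n : Int) :
    nsubA cs n = (PySem.List.pyRange 1 (cs.length : Int)).flatMap (FA cs n) := by
  rw [nsubA]
  rw [PySem.List.foldl_congr_mem _ _ (fun tuples t => tuples ++ FA cs n t.1) []
      (by intro acc t _; simp only [FA]; split <;> rfl)]
  rw [List.foldl_attach (f := fun tuples x => tuples ++ FA cs n x),
      PySem.List.foldl_append_eq_flatMap]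
  simp

lemma pyRange_map_add (a b c : Int) :
    PySem.List.pyRange (a + c) (b + c) = (PySem.List.pyRange a b).map (· + c) := by
  by_cases h : a < b
  · obtain ⟨k, hkeq⟩ : ∃ k : Nat, (b - a).toNat = k := ⟨_, rfl⟩
    induction k generalizing a with
    | zero => omega
    | succ k ih =>
      rw [PySem.List.pyRange_one_cons h, PySem.List.pyRange_one_cons (by omega : a + c < b + c)]
      simp only [List.map_cons]
      by_cases h2 : a + 1 < b
      · rw [show a + c + 1 = (a + 1) + c from by ring, ih (a + 1) h2 (by omega)]
      · rw [PySem.List.pyRange_one_eq_nil (by omega : b ≤ a + 1),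
            PySem.List.pyRange_one_eq_nil (by omega : b + c ≤ a + c + 1)]
        simp
  · rw [PySem.List.pyRange_one_eq_nil (by omega), PySem.List.pyRange_one_eq_nil (by omega)]
    simp

lemma GB_shift (cs : List Char) (m j i : Int) (h0 : 0 ≤ j) (hi : 0 ≤ i) :
    GB cs m j (i + j) = FA (PySem.List.slice cs (some j) none) m i := by
  have h1 : PySem.List.slice cs (some j) (some (i + j)) =
      PySem.List.slice (PySem.List.slice cs (some j) none) (some 0) (some i) := by
    rw [PySem.List.slice_from cs h0, PySem.List.slice_toNat cs h0 (by omega)]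
    rw [PySem.List.slice_zero_start, PySem.List.slice_to _ hi]
    rw [show ((i + j).toNat - j.toNat) = i.toNat from by omega]
  have h2 : PySem.List.slice cs (some (i + j)) none =
      PySem.List.slice (PySem.List.slice cs (some j) none) (some i) none := by
    rw [PySem.List.slice_from cs h0, PySem.List.slice_from cs (by omega : (0:Int) ≤ i + j),
        PySem.List.slice_from _ hi, List.drop_drop]
    rw [show (i + j).toNat = j.toNat + i.toNat from by omega]
  unfold GB FA
  rw [h1, h2]

-- B's result expressed via A: the loop of nsubBgo produces the flatMap of GB
lemma foldB (cs : List Char) (j m : Int)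
    (IH : ∀ k memo, j < k → k < (cs.length : Int) → InvM cs memo →
      (nsubBgo cs k (m - 1) memo).2 = nsubA (PySem.List.slice cs (some k) none) (m - 1) ∧
      InvM cs (nsubBgo cs k (m - 1) memo).1) :
    ∀ (ks : List Int), (∀ k ∈ ks, j < k ∧ k < (cs.length : Int)) →
    ∀ memo out, InvM cs memo →
      (ks.foldl (fun st k =>
        if m = 2 then
          (st.1, st.2 ++ [[String.ofList (PySem.List.slice cs (some j) (some k)),
                           String.ofList (PySem.List.slice cs (some k) none)]])
        else
          ((nsubBgo cs k (m - 1) st.1).1,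
           st.2 ++ (nsubBgo cs k (m - 1) st.1).2.map
             (String.ofList (PySem.List.slice cs (some j) (some k)) :: ·)))
        (memo, out)).2 = out ++ ks.flatMap (GB cs m j) ∧
      InvM cs ((ks.foldl (fun st k =>
        if m = 2 then
          (st.1, st.2 ++ [[String.ofList (PySem.List.slice cs (some j) (some k)),
                           String.ofList (PySem.List.slice cs (some k) none)]])
        else
          ((nsubBgo cs k (m - 1) st.1).1,
           st.2 ++ (nsubBgo cs k (m - 1) st.1).2.map
             (String.ofList (PySem.List.slice cs (some j) (some k)) :: ·)))
        (memo, out)).1) := by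
  intro ks
  induction ks with
  | nil => intro _ memo out hInv; simpa using hInv
  | cons k ks ih =>
    intro hb memo out hInv
    have hk := hb k (List.mem_cons_self)
    simp only [List.foldl_cons]
    by_cases hm : m = 2
    · have hstep : (if m = 2 then
          ((memo, out).1, (memo, out).2 ++ [[String.ofList (PySem.List.slice cs (some j) (some k)),
                           String.ofList (PySem.List.slice cs (some k) none)]])
        else
          ((nsubBgo cs k (m - 1) (memo, out).1).1,
           (memo, out).2 ++ (nsubBgo cs k (m - 1) (memo, out).1).2.map
             (String.ofList (PySem.List.slice cs (some j) (some k)) :: ·)))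
          = (memo, out ++ GB cs m j k) := by
        rw [if_pos hm]; unfold GB; rw [if_pos hm]
      rw [hstep]
      obtain ⟨r1, r2⟩ := ih (fun x hx => hb x (List.mem_cons_of_mem _ hx)) memo
        (out ++ GB cs m j k) hInv
      exact ⟨by rw [r1]; simp, r2⟩
    · obtain ⟨h1, h2⟩ := IH k memo hk.1 hk.2 hInv
      have hstep : (if m = 2 then
          ((memo, out).1, (memo, out).2 ++ [[String.ofList (PySem.List.slice cs (some j) (some k)),
                           String.ofList (PySem.List.slice cs (some k) none)]])
        else
          ((nsubBgo cs k (m - 1) (memo, out).1).1,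
           (memo, out).2 ++ (nsubBgo cs k (m - 1) (memo, out).1).2.map
             (String.ofList (PySem.List.slice cs (some j) (some k)) :: ·)))
          = ((nsubBgo cs k (m - 1) memo).1, out ++ GB cs m j k) := by
        rw [if_neg hm]; unfold GB; rw [if_neg hm, h1]
      rw [hstep]
      obtain ⟨r1, r2⟩ := ih (fun x hx => hb x (List.mem_cons_of_mem _ hx))
        (nsubBgo cs k (m - 1) memo).1 (out ++ GB cs m j k) h2
      exact ⟨by rw [r1]; simp, r2⟩

lemma go_spec (cs : List Char) :
    ∀ (N : Nat) (j m : Int) memo, ((cs.length : Int) - j).toNat ≤ N → 0 ≤ j →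
      j ≤ (cs.length : Int) → InvM cs memo →
      (nsubBgo cs j m memo).2 = nsubA (PySem.List.slice cs (some j) none) m ∧
      InvM cs (nsubBgo cs j m memo).1 := by
  intro N
  induction N with
  | zero =>
    intro j m memo hN h0 hj hInv
    have hjl : j = (cs.length : Int) := by omega
    subst hjl
    have hA : nsubA (PySem.List.slice cs (some (cs.length : Int)) none) m = [] := by
      rw [PySem.List.slice_from cs (by omega : (0:Int) ≤ (cs.length : Int))]
      simp only [Int.toNat_natCast, List.drop_length]
      rw [nsubA_eq]
      rw [show ((([] : List Char).length : Int)) = 0 from by simp,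
          PySem.List.pyRange_one_eq_nil (by omega : (0:Int) ≤ 1)]
      simp
    rw [nsubBgo]
    cases hget : memo.get? ((cs.length : Int), m) with
    | some v => exact ⟨hInv _ v hget, hInv⟩
    | none =>
      rw [List.foldl_attach
        (f := fun (st : PySem.Dict (Int × Int) (List (List String)) × List (List String)) k =>
          if m = 2 then
            (st.1, st.2 ++ [[String.ofList (PySem.List.slice cs (some (cs.length : Int)) (some k)),
                             String.ofList (PySem.List.slice cs (some k) none)]])
          else
            ((nsubBgo cs k (m - 1) st.1).1,
             st.2 ++ (nsubBgo cs k (m - 1) st.1).2.map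
               fun tp => String.ofList (PySem.List.slice cs (some (cs.length : Int)) (some k)) :: tp)),
        PySem.List.pyRange_one_eq_nil
          (by omega : (cs.length : Int) ≤ (cs.length : Int) + 1)]
      simp only [List.foldl_nil]
      refine ⟨hA.symm, ?_⟩
      intro p v hpv
      by_cases hp : p = ((cs.length : Int), m)
      · subst hp
        rw [PySem.Dict.get?_insert_self] at hpv
        cases hpv
        exact hA.symm
      · rw [PySem.Dict.get?_insert_of_ne _ _ hp] at hpv
        exact hInv p v hpv
  | succ N ihN =>
    intro j m memo hN h0 hj hInv
    rw [nsubBgo]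
    cases hget : memo.get? (j, m) with
    | some v =>
      exact ⟨hInv (j, m) v hget, hInv⟩
    | none =>
      rw [List.foldl_attach
        (f := fun (st : PySem.Dict (Int × Int) (List (List String)) × List (List String)) k =>
          if m = 2 then
            (st.1, st.2 ++ [[String.ofList (PySem.List.slice cs (some j) (some k)),
                             String.ofList (PySem.List.slice cs (some k) none)]])
          else
            ((nsubBgo cs k (m - 1) st.1).1,
             st.2 ++ (nsubBgo cs k (m - 1) st.1).2.map
               fun tp => String.ofList (PySem.List.slice cs (some j) (some k)) :: tp))]
      obtain ⟨r1, r2⟩ := foldB cs j m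
        (by
          intro k memo' hjk hk hInv'
          exact ihN k (m - 1) memo' (by omega) (by omega) (by omega) hInv')
        (PySem.List.pyRange (j + 1) (cs.length : Int))
        (by intro k hkmem; have := (PySem.List.mem_pyRange_one).1 hkmem; omega)
        memo [] hInv
      have key : (PySem.List.pyRange (j + 1) (cs.length : Int)).flatMap (GB cs m j)
          = nsubA (PySem.List.slice cs (some j) none) m := by
        rw [nsubA_eq]
        have hlen : ((PySem.List.slice cs (some j) none).length : Int) = (cs.length : Int) - j := by
          rw [PySem.List.slice_from cs h0, List.length_drop]
          omega
        rw [hlen]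
        have hr : PySem.List.pyRange (j + 1) (cs.length : Int)
            = (PySem.List.pyRange 1 ((cs.length : Int) - j)).map (· + j) := by
          have h := pyRange_map_add 1 ((cs.length : Int) - j) j
          rwa [show (1 : Int) + j = j + 1 from by ring,
               show (cs.length : Int) - j + j = (cs.length : Int) from by ring] at h
        rw [hr, List.flatMap_map]
        exact List.flatMap_congr (fun i hi =>
          GB_shift cs m j i h0 (by have := (PySem.List.mem_pyRange_one).1 hi; omega))
      constructor
      · simp only [r1] at *
        simpa using key
      · intro p v hpv
        by_cases hp : p = (j, m)
        · subst hp
          rw [PySem.Dict.get?_insert_self] at hpv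
          cases hpv
          rw [r1]; simpa using key
        · rw [PySem.Dict.get?_insert_of_ne _ _ hp] at hpv
          exact r2 p v hpv

-- ===== VERDICT (by name: the statement is the Claim_ definition above) =====
theorem nsubstrings_spec : Claim_equal_nsubstrings := by
  intro s n _
  unfold Spec_nsubstrings nsubstrings nsubstrings_alt
  have hInv : InvM s.toList PySem.Dict.empty := by
    intro p v h; rw [PySem.Dict.get?_empty] at h; cases h
  have h := (go_spec s.toList (((s.toList.length : Int) - 0).toNat) 0 n PySem.Dict.empty
    le_rfl le_rfl (by exact_mod_cast Nat.zero_le _) hInv).1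
  rw [h]
  simp [PySem.List.slice_from s.toList (le_refl (0:Int))]
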